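-- pv_equiv track=rewrite | github.com/miyu-y/nlp2026_spandetect | create_srl_dataset.py | _collect_boundaries_from_verbs
-- ===== SOURCE A (Python) =====
-- def _collect_boundaries_from_verbs(verbs_tags):
--     """
--     複数の述語タグ列（BIO付き）から、
--     「どこでラベルが切り替わるか」を集約して最小分割の境界集合を作る。
--     """
--     if not verbs_tags:
--         return set()
--
--     N = len(verbs_tags[0])
--     boundaries = {0, N}
--
--     for tags in verbs_tags:
--         in_seg = False
--         cur_label = None
--         for i, tag in enumerate(tags):
--             if tag == "O":
--                 if in_seg:
--                     boundaries.add(i)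
--                     in_seg = False
--                     cur_label = None
--             elif tag.startswith("B-"):
--                 if in_seg:
--                     boundaries.add(i)
--                 boundaries.add(i)
--                 in_seg = True
--                 cur_label = tag[2:]
--             elif tag.startswith("I-"):
--                 lab = tag[2:]
--                 if not in_seg:
--                     boundaries.add(i)
--                     in_seg = True
--                     cur_label = lab
--                 elif lab != cur_label:
--                     boundaries.add(i)
--                     cur_label = lab
--         if in_seg:
--             boundaries.add(N)
--
--     return set(sorted(boundaries))
-- ===== SOURCE B (Python) =====
-- def _collect_boundaries_from_verbs(verbs_tags):
--     """Staged version: per row, first forward-fill an array `eff` of effective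
--     labels (eff[i] = label in force before token i, None = outside), then read
--     the boundaries off it: B- start positions plus positions where eff changes."""
--     if not verbs_tags:
--         return set()
--
--     N = len(verbs_tags[0])
--     boundaries = {0, N}
--
--     for tags in verbs_tags:
--         # stage 1: forward-fill effective labels (unrecognized tags carry the label through)
--         eff = [None]
--         for tag in tags:
--             if tag == "O":
--                 nxt = None
--             elif tag[:2] in ("B-", "I-"):
--                 nxt = tag[2:]
--             else:
--                 nxt = eff[-1]
--             eff.append(nxt)
--         # stage 2: boundaries = explicit B- starts + adjacent differences of eff
--         boundaries.update(i for i, tag in enumerate(tags) if tag.startswith("B-"))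
--         boundaries.update(i for i, (p, c) in enumerate(zip(eff, eff[1:])) if p != c)
--         if eff[-1] is not None:
--             boundaries.add(N)
--
--     return set(sorted(boundaries))
-- ===== Notes on version B (the rewrite author's own statement) =====
-- stated objective: alternative
-- what changed: Replaces A's single-pass in_seg/cur_label state machine that adds boundaries inside the scan by a staged pipeline: per row it first materializes a forward-filled effective-label array eff, then derives boundaries declaratively as the B- start positions plus the adjacent-difference positions of eff (zip with its own tail), plus the row end if eff ends inside a segment.
import Mathlib
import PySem

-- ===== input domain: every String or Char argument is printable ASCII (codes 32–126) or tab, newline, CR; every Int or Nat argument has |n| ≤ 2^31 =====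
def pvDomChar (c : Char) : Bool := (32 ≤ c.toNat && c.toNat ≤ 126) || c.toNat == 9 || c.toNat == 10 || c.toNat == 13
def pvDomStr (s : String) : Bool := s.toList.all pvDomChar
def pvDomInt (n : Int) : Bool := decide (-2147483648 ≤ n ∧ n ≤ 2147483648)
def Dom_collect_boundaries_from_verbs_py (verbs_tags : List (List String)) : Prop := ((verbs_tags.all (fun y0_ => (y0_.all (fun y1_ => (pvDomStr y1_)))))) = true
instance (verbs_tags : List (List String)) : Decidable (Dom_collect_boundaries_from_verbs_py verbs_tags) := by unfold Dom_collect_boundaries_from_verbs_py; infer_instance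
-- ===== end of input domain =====

-- B replaces A's boundary-adding in_seg/cur_label state machine by a staged pass:
-- materialize the forward-filled effective-label array, then read boundaries off it
-- (objective: alternative decomposition, same cost; return value only).

-- ===== PORT A =====
-- A's inner-loop state: (boundaries, in_seg, cur_label)
def pvAStep (st : PySem.Set Int × Bool × Option String) (p : Int × String) :
    PySem.Set Int × Bool × Option String :=
  let (boundaries, in_seg, cur_label) := st
  let (i, tag) := p
  if tag == "O" then
    if in_seg then (boundaries.add i, false, none) else (boundaries, in_seg, cur_label)
  else if PySem.Str.startswith tag "B-" then
    let boundaries := if in_seg then boundaries.add i else boundaries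
    (boundaries.add i, true, some (PySem.Str.slice tag (some 2) none))
  else if PySem.Str.startswith tag "I-" then
    let lab := PySem.Str.slice tag (some 2) none
    if !in_seg then (boundaries.add i, true, some lab)
    else if some lab ≠ cur_label then (boundaries.add i, in_seg, some lab)
    else (boundaries, in_seg, cur_label)
  else (boundaries, in_seg, cur_label)

def pvARow (N : Int) (boundaries : PySem.Set Int) (tags : List String) : PySem.Set Int :=
  let st := (PySem.List.enumerate tags 0).foldl pvAStep (boundaries, false, none)
  if st.2.1 then st.1.add N else st.1

def collect_boundaries_from_verbs_py (verbs_tags : List (List String)) : List Int :=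
  match verbs_tags with
  | [] => []
  | first :: _ =>
    let N : Int := first.length
    let boundaries : PySem.Set Int := PySem.Set.ofList [0, N]
    let boundaries := verbs_tags.foldl (fun b tags => pvARow N b tags) boundaries
    PySem.Set.ofList (PySem.List.sorted boundaries (fun x => x) false)

-- ===== PORT B =====
-- stage 1: forward-fill the effective-label array eff (starts as [None]; each tag appends)
def pvBuildEff (tags : List String) : List (Option String) :=
  tags.foldl (fun eff tag =>
    let nxt : Option String :=
      if tag == "O" then none
      else if (PySem.Str.slice tag none (some 2) == "B-") || (PySem.Str.slice tag none (some 2) == "I-") then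
        some (PySem.Str.slice tag (some 2) none)
      else PySem.List.pyGetD eff (-1) none   -- eff[-1]; eff is never empty here
    eff ++ [nxt]) [none]

-- stage 2: B- start positions, then adjacent differences of eff, then the row end
def pvBRow (N : Int) (b0 : PySem.Set Int) (tags : List String) : PySem.Set Int :=
  let eff := pvBuildEff tags
  let b1 := (PySem.List.enumerate tags 0).foldl
    (fun b p => if PySem.Str.startswith p.2 "B-" then b.add p.1 else b) b0
  let b2 := (PySem.List.enumerate (eff.zip (PySem.List.slice eff (some 1) none)) 0).foldl
    (fun b p => if p.2.1 ≠ p.2.2 then b.add p.1 else b) b1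
  if (PySem.List.pyGetD eff (-1) none).isSome then b2.add N else b2

def collect_boundaries_from_verbs_py_alt (verbs_tags : List (List String)) : List Int :=
  match verbs_tags with
  | [] => []
  | first :: _ =>
    let N : Int := first.length
    let boundaries : PySem.Set Int := PySem.Set.ofList [0, N]
    let boundaries := verbs_tags.foldl (fun b tags => pvBRow N b tags) boundaries
    PySem.Set.ofList (PySem.List.sorted boundaries (fun x => x) false)

-- ===== PRECONDITION & SPEC =====
def Spec_collect_boundaries_from_verbs_py (verbs_tags : List (List String)) (out : List Int) : Prop := out = collect_boundaries_from_verbs_py_alt verbs_tags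
instance (verbs_tags : List (List String)) (out : List Int) : Decidable (Spec_collect_boundaries_from_verbs_py verbs_tags out) := by unfold Spec_collect_boundaries_from_verbs_py; infer_instance

-- ===== CLAIM (what is proved, stated in full; the proofs are below) =====
def Claim_equal_collect_boundaries_from_verbs_py : Prop := ∀ (verbs_tags : List (List String)), Dom_collect_boundaries_from_verbs_py verbs_tags → Spec_collect_boundaries_from_verbs_py verbs_tags (collect_boundaries_from_verbs_py verbs_tags)

-- ===== LEMMAS AND PROOFS =====

-- the "next effective label" transition (B's stage 1, and A's cur_label update)
def pvEffNext (prev : Option String) (tag : String) : Option String :=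
  if tag == "O" then none
  else if (PySem.Str.slice tag none (some 2) == "B-") || (PySem.Str.slice tag none (some 2) == "I-") then
    some (PySem.Str.slice tag (some 2) none)
  else prev

-- the tail of the effective-label array as a pure recursion
def pvEffTail (prev : Option String) : List String → List (Option String)
  | [] => []
  | t :: ts => pvEffNext prev t :: pvEffTail (pvEffNext prev t) ts

def pvEffLast (prev : Option String) : List String → Option String
  | [] => prev
  | t :: ts => pvEffLast (pvEffNext prev t) ts

-- A's inner loop as a pure recursion over the tags (boundaries, final label)
def pvAPure (prev : Option String) (i : Int) (b : PySem.Set Int) :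
    List String → PySem.Set Int × Option String
  | [] => (b, prev)
  | t :: ts =>
    let n := pvEffNext prev t
    pvAPure n (i + 1)
      (if PySem.Str.startswith t "B-" ∨ n ≠ prev then b.add i else b) ts

theorem pv_sw (t : String) (c : Char) :
    PySem.Str.startswith t (String.ofList [c, '-']) =
      (PySem.Str.slice t none (some 2) == String.ofList [c, '-']) := by
  rw [Bool.eq_iff_iff]
  rw [PySem.Str.startswith_eq, PySem.Chars.startswith_iff, beq_iff_eq, List.prefix_iff_eq_take,
    ← String.toList_inj, PySem.Str.toList_slice, PySem.Chars.slice,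
    PySem.List.slice_to t.toList (by omega)]
  simp
  exact eq_comm
theorem pv_add_add_self (s : PySem.Set Int) (x : Int) :
    (s.add x).add x = s.add x :=
  PySem.Set.add_of_mem (by simp [PySem.Set.mem_add])

theorem pvA_fold_eq (ts : List String) (i : Int) (b : PySem.Set Int) (prev : Option String) :
    (PySem.List.enumerate ts i).foldl pvAStep (b, prev.isSome, prev)
      = ((pvAPure prev i b ts).1, (pvAPure prev i b ts).2.isSome, (pvAPure prev i b ts).2) := by
  induction ts generalizing i b prev with
  | nil => rfl
  | cons t ts ih =>
    rw [PySem.List.enumerate_cons, List.foldl_cons]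
    by_cases hO : t = "O"
    · subst hO
      have hc : PySem.Chars.startswith ['O'] ['B', '-'] = false := by decide
      cases prev with
      | none =>
        simp only [pvAStep, pvAPure, pvEffNext]
        simpa using ih (i + 1) b none
      | some c =>
        simp only [pvAStep, pvAPure, pvEffNext]
        simpa using ih (i + 1) (b.add i) none
    · have hO' : (t == "O") = false := by simp [hO]
      by_cases hB : PySem.Str.startswith t "B-" = true
      · have hBs : (PySem.Str.slice t none (some 2) == "B-") = true := by
          rw [show ("B-" : String) = String.ofList ['B', '-'] from rfl] at hB ⊢
          rw [← pv_sw]; exact hB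
        cases prev with
        | none =>
          simp only [pvAStep, pvAPure, pvEffNext, hO', hB, hBs]
          simpa using ih (i + 1) (b.add i) (some (PySem.Str.slice t (some 2) none))
        | some c =>
          simp only [pvAStep, pvAPure, pvEffNext, hO', hB, hBs]
          simpa [pv_add_add_self] using
            ih (i + 1) ((b.add i).add i) (some (PySem.Str.slice t (some 2) none))
      · have hB' : PySem.Str.startswith t "B-" = false := by simpa using hB
        have hBs : (PySem.Str.slice t none (some 2) == "B-") = false := by
          rw [show ("B-" : String) = String.ofList ['B', '-'] from rfl] at hB' ⊢
          rw [← pv_sw]; exact hB'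
        by_cases hI : PySem.Str.startswith t "I-" = true
        · have hIs : (PySem.Str.slice t none (some 2) == "I-") = true := by
            rw [show ("I-" : String) = String.ofList ['I', '-'] from rfl] at hI ⊢
            rw [← pv_sw]; exact hI
          cases prev with
          | none =>
            simp only [pvAStep, pvAPure, pvEffNext, hO', hB', hBs, hI, hIs]
            simpa using ih (i + 1) (b.add i) (some (PySem.Str.slice t (some 2) none))
          | some c =>
            by_cases hc : PySem.Str.slice t (some 2) none = c
            · simp only [pvAStep, pvAPure, pvEffNext, hO', hB', hBs, hI, hIs, hc]
              simpa using ih (i + 1) b (some c)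
            · simp only [pvAStep, pvAPure, pvEffNext, hO', hB', hBs, hI, hIs]
              simp [hc]
              simpa using ih (i + 1) (b.add i) (some (PySem.Str.slice t (some 2) none))
        · have hI' : PySem.Str.startswith t "I-" = false := by simpa using hI
          have hIs : (PySem.Str.slice t none (some 2) == "I-") = false := by
            rw [show ("I-" : String) = String.ofList ['I', '-'] from rfl] at hI' ⊢
            rw [← pv_sw]; exact hI'
          cases prev with
          | none =>
            simp only [pvAStep, pvAPure, pvEffNext, hO', hB', hBs, hI', hIs]
            simpa using ih (i + 1) b none
          | some c =>
            simp only [pvAStep, pvAPure, pvEffNext, hO', hB', hBs, hI', hIs]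
            simpa using ih (i + 1) b (some c)

theorem pvBuildEff_go (ts : List String) (acc : List (Option String)) (x : Option String) :
    ts.foldl (fun eff tag =>
      let nxt : Option String :=
        if tag == "O" then none
        else if (PySem.Str.slice tag none (some 2) == "B-") || (PySem.Str.slice tag none (some 2) == "I-") then
          some (PySem.Str.slice tag (some 2) none)
        else PySem.List.pyGetD eff (-1) none
      eff ++ [nxt]) (acc ++ [x]) = acc ++ [x] ++ pvEffTail x ts := by
  induction ts generalizing acc x with
  | nil => simp [pvEffTail]
  | cons t ts ih =>
    simp only [List.foldl_cons, PySem.List.pyGetD_neg_one_append_singleton]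
    rw [show acc ++ [x] ++ [if t == "O" then none
        else if (PySem.Str.slice t none (some 2) == "B-") || (PySem.Str.slice t none (some 2) == "I-") then
          some (PySem.Str.slice t (some 2) none) else x] = (acc ++ [x]) ++ [pvEffNext x t] from by
      simp [pvEffNext]]
    rw [ih]
    simp [pvEffTail]

theorem pvBuildEff_eq (tags : List String) :
    pvBuildEff tags = none :: pvEffTail none tags := by
  have := pvBuildEff_go tags [] none
  simpa [pvBuildEff] using this

theorem pvEffTail_getLast (ts : List String) (prev : Option String) :
    (prev :: pvEffTail prev ts).getLast (by simp) = pvEffLast prev ts := by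
  induction ts generalizing prev with
  | nil => rfl
  | cons t ts ih =>
    simp only [pvEffTail, pvEffLast]
    rw [List.getLast_cons (by simp)]
    exact ih _

theorem pvEffTail_last (ts : List String) (prev : Option String) :
    PySem.List.pyGetD (prev :: pvEffTail prev ts) (-1) none = pvEffLast prev ts := by
  rw [PySem.List.pyGetD_neg_one (prev :: pvEffTail prev ts) none (by simp)]
  exact pvEffTail_getLast ts prev

theorem pvAPure_mem (ts : List String) (prev : Option String) (i : Int) (b : PySem.Set Int)
    (x : Int) :
    x ∈ (pvAPure prev i b ts).1 ↔ x ∈ b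
      ∨ (∃ p ∈ PySem.List.enumerate ts i, PySem.Str.startswith p.2 "B-" ∧ x = p.1)
      ∨ (∃ p ∈ PySem.List.enumerate ((prev :: pvEffTail prev ts).zip (pvEffTail prev ts)) i,
            p.2.1 ≠ p.2.2 ∧ x = p.1) := by
  induction ts generalizing prev i b with
  | nil => simp [pvAPure, pvEffTail]
  | cons t ts ih =>
    rw [show pvAPure prev i b (t :: ts)
        = pvAPure (pvEffNext prev t) (i + 1)
            (if PySem.Str.startswith t "B-" ∨ pvEffNext prev t ≠ prev then b.add i else b) ts
      from rfl]
    rw [ih]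
    simp only [pvEffTail, PySem.List.enumerate_cons, List.zip_cons_cons, List.mem_cons]
    split_ifs with h
    · simp only [PySem.Set.mem_add]
      constructor
      · rintro ((hb | hi) | ⟨p, hp, hc⟩ | ⟨p, hp, hc⟩)
        · exact Or.inl hb
        · rcases h with h | h
          · exact Or.inr (Or.inl ⟨(i, t), Or.inl rfl, h, hi⟩)
          · exact Or.inr (Or.inr ⟨(i, (prev, pvEffNext prev t)), Or.inl rfl, Ne.symm h, hi⟩)
        · exact Or.inr (Or.inl ⟨p, Or.inr hp, hc⟩)
        · exact Or.inr (Or.inr ⟨p, Or.inr hp, hc⟩)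
      · rintro (hb | ⟨p, hp | hp, hc, hx⟩ | ⟨p, hp | hp, hc, hx⟩)
        · exact Or.inl (Or.inl hb)
        · exact Or.inl (Or.inr (by rw [hx, hp]))
        · exact Or.inr (Or.inl ⟨p, hp, hc, hx⟩)
        · exact Or.inl (Or.inr (by rw [hx, hp]))
        · exact Or.inr (Or.inr ⟨p, hp, hc, hx⟩)
    · push Not at h
      constructor
      · rintro (hb | ⟨p, hp, hc⟩ | ⟨p, hp, hc⟩)
        · exact Or.inl hb
        · exact Or.inr (Or.inl ⟨p, Or.inr hp, hc⟩)
        · exact Or.inr (Or.inr ⟨p, Or.inr hp, hc⟩)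
      · rintro (hb | ⟨p, hp | hp, hc, hx⟩ | ⟨p, hp | hp, hc, hx⟩)
        · exact Or.inl hb
        · exact absurd (by rw [hp] at hc; exact hc) (by simpa using h.1)
        · exact Or.inr (Or.inl ⟨p, hp, hc, hx⟩)
        · exact absurd (by rw [hp] at hc; exact hc) (by simp [h.2])
        · exact Or.inr (Or.inr ⟨p, hp, hc, hx⟩)


theorem pvAPure_snd (ts : List String) (prev : Option String) (i : Int) (b : PySem.Set Int) :
    (pvAPure prev i b ts).2 = pvEffLast prev ts := by
  induction ts generalizing prev i b with
  | nil => rfl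
  | cons t ts ih => simp [pvAPure, pvEffLast, ih]

theorem pvAPure_nodup (ts : List String) (prev : Option String) (i : Int) (b : PySem.Set Int)
    (hb : b.Nodup) : (pvAPure prev i b ts).1.Nodup := by
  induction ts generalizing prev i b with
  | nil => exact hb
  | cons t ts ih =>
    apply ih
    split_ifs with h
    · exact PySem.Set.nodup_add _ _ hb
    · exact hb

-- membership through a conditional-add fold
theorem pv_mem_foldl_ite_add {β : Type} (l : List β) (c : β → Prop) [DecidablePred c]
    (f : β → Int) (s : PySem.Set Int) (x : Int) :
    x ∈ l.foldl (fun b p => if c p then b.add (f p) else b) s ↔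
      x ∈ s ∨ ∃ p ∈ l, c p ∧ x = f p := by
  induction l generalizing s with
  | nil => simp
  | cons y l ih =>
    simp only [List.foldl_cons, ih, List.mem_cons]
    split_ifs with h <;> simp [PySem.Set.mem_add] <;> tauto

theorem pv_nodup_foldl_ite_add {β : Type} (l : List β) (c : β → Prop) [DecidablePred c]
    (f : β → Int) (s : PySem.Set Int) (hs : s.Nodup) :
    (l.foldl (fun b p => if c p then b.add (f p) else b) s).Nodup := by
  induction l generalizing s with
  | nil => exact hs
  | cons y l ih =>
    simp only [List.foldl_cons]
    apply ih
    split_ifs with h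
    · exact PySem.Set.nodup_add _ _ hs
    · exact hs

-- per row: same members
theorem pvRow_mem (N : Int) (bA bB : PySem.Set Int) (tags : List String)
    (h : ∀ x, x ∈ bA ↔ x ∈ bB) (x : Int) :
    x ∈ pvARow N bA tags ↔ x ∈ pvBRow N bB tags := by
  unfold pvARow pvBRow
  dsimp only
  rw [show ((bA, false, (none : Option String)) : PySem.Set Int × Bool × Option String)
        = (bA, (none : Option String).isSome, none) from rfl, pvA_fold_eq]
  rw [pvBuildEff_eq, PySem.List.slice_from_one, List.tail_cons, pvAPure_snd, pvEffTail_last]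
  dsimp only
  split_ifs with hseg
  · simp only [PySem.Set.mem_add,
      pv_mem_foldl_ite_add (PySem.List.enumerate ((none :: pvEffTail none tags).zip (pvEffTail none tags)) 0)
        (fun p => p.2.1 ≠ p.2.2) (fun p => p.1),
      pv_mem_foldl_ite_add (PySem.List.enumerate tags 0)
        (fun p => PySem.Str.startswith p.2 "B-" = true) (fun p => p.1),
      pvAPure_mem, h]
    simp [or_assoc]
  · simp only [
      pv_mem_foldl_ite_add (PySem.List.enumerate ((none :: pvEffTail none tags).zip (pvEffTail none tags)) 0)
        (fun p => p.2.1 ≠ p.2.2) (fun p => p.1),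
      pv_mem_foldl_ite_add (PySem.List.enumerate tags 0)
        (fun p => PySem.Str.startswith p.2 "B-" = true) (fun p => p.1),
      pvAPure_mem, h]
    simp [or_assoc]

theorem pvARow_nodup (N : Int) (b : PySem.Set Int) (tags : List String) (hb : b.Nodup) :
    (pvARow N b tags).Nodup := by
  unfold pvARow
  rw [show ((b, false, (none : Option String)) : PySem.Set Int × Bool × Option String)
        = (b, (none : Option String).isSome, none) from rfl, pvA_fold_eq]
  have := pvAPure_nodup tags none 0 b hb
  dsimp only
  split_ifs with h
  · exact PySem.Set.nodup_add _ _ this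
  · exact this

theorem pvBRow_nodup (N : Int) (b : PySem.Set Int) (tags : List String) (hb : b.Nodup) :
    (pvBRow N b tags).Nodup := by
  unfold pvBRow
  have h1 := pv_nodup_foldl_ite_add (PySem.List.enumerate tags 0)
    (fun p => PySem.Str.startswith p.2 "B-" = true) (fun p => p.1) b hb
  have h2 := pv_nodup_foldl_ite_add
    (PySem.List.enumerate ((pvBuildEff tags).zip (PySem.List.slice (pvBuildEff tags) (some 1) none)) 0)
    (fun p => p.2.1 ≠ p.2.2) (fun p => p.1) _ h1
  dsimp only
  split_ifs with h
  · exact PySem.Set.nodup_add _ _ h2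
  · exact h2

theorem pv_pairwise_lt_of_nodup {l : List Int} (h1 : l.Pairwise (· ≤ ·)) (h2 : l.Nodup) :
    l.Pairwise (· < ·) := by
  have := List.Pairwise.and h1 h2
  exact this.imp (fun ⟨hle, hne⟩ => lt_of_le_of_ne hle hne)

-- fold over all rows: same members, both nodup
theorem pvRows (verbs_tags : List (List String)) (N : Int) (bA bB : PySem.Set Int)
    (h : ∀ x, x ∈ bA ↔ x ∈ bB) (hA : bA.Nodup) (hB : bB.Nodup) :
    (∀ x, x ∈ verbs_tags.foldl (fun b tags => pvARow N b tags) bA ↔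
          x ∈ verbs_tags.foldl (fun b tags => pvBRow N b tags) bB)
    ∧ (verbs_tags.foldl (fun b tags => pvARow N b tags) bA).Nodup
    ∧ (verbs_tags.foldl (fun b tags => pvBRow N b tags) bB).Nodup := by
  induction verbs_tags generalizing bA bB with
  | nil => exact ⟨h, hA, hB⟩
  | cons tags rest ih =>
    exact ih _ _ (fun x => pvRow_mem N bA bB tags h x)
      (pvARow_nodup N bA tags hA) (pvBRow_nodup N bB tags hB)

-- ===== VERDICT (by name: the statement is the Claim_ definition above) =====
theorem collect_boundaries_from_verbs_py_spec : Claim_equal_collect_boundaries_from_verbs_py := by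
  intro verbs_tags _
  unfold Spec_collect_boundaries_from_verbs_py
  unfold collect_boundaries_from_verbs_py collect_boundaries_from_verbs_py_alt
  cases verbs_tags with
  | nil => rfl
  | cons first rest =>
    simp only
    obtain ⟨hmem, hA, hB⟩ := pvRows (first :: rest) (first.length : Int)
      (PySem.Set.ofList [0, (first.length : Int)]) (PySem.Set.ofList [0, (first.length : Int)])
      (fun x => Iff.rfl) (PySem.Set.nodup_ofList _) (PySem.Set.nodup_ofList _)
    set lA := (first :: rest).foldl (fun b tags => pvARow (first.length : Int) b tags)
      (PySem.Set.ofList [0, (first.length : Int)]) with hlA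
    set lB := (first :: rest).foldl (fun b tags => pvBRow (first.length : Int) b tags)
      (PySem.Set.ofList [0, (first.length : Int)]) with hlB
    have hperm : lA.Perm lB := (List.perm_ext_iff_of_nodup hA hB).mpr hmem
    have hs : PySem.List.sorted lA (fun x => x) false = PySem.List.sorted lB (fun x => x) false := by
      apply PySem.List.sorted_eq_of_perm_of_pairwise_lt
      · exact (PySem.List.sorted_perm lB (fun x => x) false).trans hperm.symm
      · exact pv_pairwise_lt_of_nodup (PySem.List.sorted_pairwise lB (fun x => x))
          ((PySem.List.sorted_perm lB (fun x => x) false).nodup_iff.mpr hB)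
    rw [hs]
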